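-- pv_equiv track=rewrite | github.com/twaite11/collateral_bio_core | modules/mining/sra_blast_miner.py | _extract_crispr_repeat_sequences
-- ===== SOURCE A (Python) =====
-- from typing import List, Tuple, Optional, Dict
--
-- def _extract_crispr_repeat_sequences(nucleotide: str, min_len: int = 20, min_count: int = 2) -> List[str]:
--     """
--     Extract CRISPR repeat sequences from nucleotide hit: tandem repeats of length
--     min_len repeated at least min_count times. Returns list of unique repeat sequences
--     (for metadata; needed for crRNA binding / functional protein).
--     """
--     n = nucleotide.replace("-", "").upper()
--     found = []
--     seen_motifs = set()
--     for L in range(min_len, min(55, len(n) // min_count + 1)):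
--         for i in range(len(n) - L * min_count + 1):
--             motif = n[i : i + L]
--             if motif in seen_motifs:
--                 continue
--             count = 0
--             j = i
--             while j <= len(n) - L and n[j : j + L] == motif:
--                 count += 1
--                 j += L
--             if count >= min_count:
--                 seen_motifs.add(motif)
--                 found.append(motif)
--     return found
-- ===== SOURCE B (Python) =====
-- def _extract_crispr_repeat_sequences(nucleotide: str, min_len: int = 20, min_count: int = 2) -> list:
--     n = nucleotide.replace("-", "").upper()
--     found = []
--     seen = set()
--     for L in range(min_len, min(55, len(n) // min_count + 1)):
--         block = L * min_count
--         for i in range(len(n) - block + 1):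
--             motif = n[i : i + L]
--             if motif not in seen and n[i : i + block] == motif * min_count:
--                 seen.add(motif)
--                 found.append(motif)
--     return found
-- ===== Notes on version B (the rewrite author's own statement) =====
-- stated objective: simpler
-- what changed: A's inner while-loop that incrementally counts consecutive motif copies (plus the count >= min_count test) is replaced by one closed-form check n[i:i+L*min_count] == motif*min_count, which verifies the min_count consecutive copies directly by string multiplication; the incremental counting loop and its counter disappear.
-- outside the precondition, e.g. on _extract_crispr_repeat_sequences('ACAC', -3, -2): A returns ['AC'], B returns []; on _extract_crispr_repeat_sequences('ACAC', -1, 2): A returns ['', 'AC'], B returns ['', 'AC']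
import Mathlib
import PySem

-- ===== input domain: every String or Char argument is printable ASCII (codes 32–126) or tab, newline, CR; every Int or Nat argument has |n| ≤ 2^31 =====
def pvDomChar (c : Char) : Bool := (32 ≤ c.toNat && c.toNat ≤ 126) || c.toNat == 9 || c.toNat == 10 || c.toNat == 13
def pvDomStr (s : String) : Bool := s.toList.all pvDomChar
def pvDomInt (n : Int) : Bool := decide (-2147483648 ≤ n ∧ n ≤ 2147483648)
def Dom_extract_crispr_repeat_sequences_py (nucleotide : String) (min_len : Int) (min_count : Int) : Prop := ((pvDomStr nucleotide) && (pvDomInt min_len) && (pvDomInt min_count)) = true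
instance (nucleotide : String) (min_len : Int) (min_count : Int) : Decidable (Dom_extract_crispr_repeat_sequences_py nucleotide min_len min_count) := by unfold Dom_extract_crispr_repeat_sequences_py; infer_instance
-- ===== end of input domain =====

-- B replaces A's inner while-loop that counts consecutive motif copies by a single
-- closed-form comparison n[i:i+L*min_count] == motif*min_count (objective: simpler).
-- Both ports work over the cleaned character list; strings are rebuilt at append time.

-- shared helper: n = nucleotide.replace("-", "").upper(), as a char list
def pvClean (nucleotide : String) : List Char :=
  PySem.Chars.upper (PySem.Chars.replace nucleotide.toList "-".toList "".toList)

-- ===== PORT A =====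
-- the while loop 'while j <= len(n) - L and n[j:j+L] == motif: count += 1; j += L'
-- (fuel only makes the recursion total; with L ≥ 1 it is never exhausted)
def pvA_while (cs : List Char) (L : Int) (motif : List Char) :
    Nat → Int → Int → Int
  | 0, count, _ => count
  | fuel + 1, count, j =>
      if j ≤ (cs.length : Int) - L ∧ PySem.List.slice cs (some j) (some (j + L)) = motif then
        pvA_while cs L motif fuel (count + 1) (j + L)
      else count

def extract_crispr_repeat_sequences_py (nucleotide : String) (min_len : Int) (min_count : Int) : List String :=
  let cs := pvClean nucleotide
  let len : Int := (cs.length : Int)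
  let st :=
    (PySem.List.pyRange min_len (min 55 (PySem.Int.floordiv len min_count + 1))).foldl
      (fun st L =>
        (PySem.List.pyRange 0 (len - L * min_count + 1)).foldl
          (fun st i =>
            let motif := PySem.List.slice cs (some i) (some (i + L))
            if PySem.Set.contains st.2 motif then st
            else
              let count := pvA_while cs L motif (cs.length + 1) 0 i
              if min_count ≤ count then
                (st.1 ++ [String.ofList motif], PySem.Set.add st.2 motif)
              else st)
          st)
      (([] : List String), (PySem.Set.empty : PySem.Set (List Char)))
  st.1

-- ===== PORT B =====
def extract_crispr_repeat_sequences_py_alt (nucleotide : String) (min_len : Int) (min_count : Int) : List String :=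
  let cs := pvClean nucleotide
  let len : Int := (cs.length : Int)
  let st :=
    (PySem.List.pyRange min_len (min 55 (PySem.Int.floordiv len min_count + 1))).foldl
      (fun st L =>
        let block := L * min_count
        (PySem.List.pyRange 0 (len - block + 1)).foldl
          (fun st i =>
            let motif := PySem.List.slice cs (some i) (some (i + L))
            if PySem.Set.contains st.2 motif = false ∧
                PySem.List.slice cs (some i) (some (i + block)) = PySem.List.pyRepeat motif min_count then
              (st.1 ++ [String.ofList motif], PySem.Set.add st.2 motif)
            else st)
          st)
      (([] : List String), (PySem.Set.empty : PySem.Set (List Char)))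
  st.1

-- ===== PRECONDITION & SPEC =====
-- Pre_ excludes (a) min_count = 0, where A raises ZeroDivisionError, and (b) non-positive
-- min_len with a nonempty L-range, where A diverges on part of the region (e.g. min_len = 0)
-- and elsewhere returns values that are artefacts of negative-length/wraparound slices.
def Pre_extract_crispr_repeat_sequences_py (nucleotide : String) (min_len : Int) (min_count : Int) : Prop :=
  min_count ≠ 0 ∧
    (1 ≤ min_len ∨
      min 55 (PySem.Int.floordiv ((pvClean nucleotide).length : Int) min_count + 1) ≤ min_len ∨
      (min_count < 0 ∧
        ((pvClean nucleotide).length : Int) + 1 ≤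
          (min 55 (PySem.Int.floordiv ((pvClean nucleotide).length : Int) min_count + 1) - 1) * min_count))
instance (nucleotide : String) (min_len : Int) (min_count : Int) : Decidable (Pre_extract_crispr_repeat_sequences_py nucleotide min_len min_count) := by unfold Pre_extract_crispr_repeat_sequences_py; infer_instance

def pvWitness_extract_crispr_repeat_sequences_py : String × Int × Int := ("AAAA", 1, 2)

def Spec_extract_crispr_repeat_sequences_py (nucleotide : String) (min_len : Int) (min_count : Int) (out : List String) : Prop := out = extract_crispr_repeat_sequences_py_alt nucleotide min_len min_count
instance (nucleotide : String) (min_len : Int) (min_count : Int) (out : List String) : Decidable (Spec_extract_crispr_repeat_sequences_py nucleotide min_len min_count out) := by unfold Spec_extract_crispr_repeat_sequences_py; infer_instance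

-- ===== CLAIM (what is proved, stated in full; the proofs are below) =====
def Claim_equal_extract_crispr_repeat_sequences_py : Prop := ∀ (nucleotide : String) (min_len : Int) (min_count : Int), Dom_extract_crispr_repeat_sequences_py nucleotide min_len min_count → Pre_extract_crispr_repeat_sequences_py nucleotide min_len min_count → Spec_extract_crispr_repeat_sequences_py nucleotide min_len min_count (extract_crispr_repeat_sequences_py nucleotide min_len min_count)

-- ===== LEMMAS AND PROOFS =====

theorem pv_foldl_congr {α β : Type} {f g : β → α → β} {l : List α} (b : β)
    (h : ∀ b' x, x ∈ l → f b' x = g b' x) : l.foldl f b = l.foldl g b := by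
  induction l generalizing b with
  | nil => rfl
  | cons x xs ih =>
      simp only [List.foldl_cons]
      rw [h b x (by simp)]
      exact ih _ (fun b' y hy => h b' y (by simp [hy]))

theorem pvA_while_acc (cs : List Char) (L : Int) (motif : List Char) :
    ∀ (fuel : Nat) (c j : Int), pvA_while cs L motif fuel c j = c + pvA_while cs L motif fuel 0 j := by
  intro fuel
  induction fuel with
  | zero => intro c j; simp [pvA_while]
  | succ f ih =>
      intro c j
      simp only [pvA_while]
      split_ifs with h
      · rw [ih (c + 1), ih (0 + 1)]; ring
      · simp

theorem pvA_while_nonneg (cs : List Char) (L : Int) (motif : List Char) :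
    ∀ (fuel : Nat) (j : Int), 0 ≤ pvA_while cs L motif fuel 0 j := by
  intro fuel
  induction fuel with
  | zero => intro j; simp [pvA_while]
  | succ f ih =>
      intro j
      simp only [pvA_while]
      split_ifs with h
      · rw [pvA_while_acc]; have := ih (j + L); omega
      · simp

-- the crux: 'count >= min_count' of A's while loop ⟺ the slice of length L*m is m copies of motif
theorem pv_count_iff (cs : List Char) (l : Nat) (motif : List Char)
    (hlen : motif.length = l) :
    ∀ (m k fuel : Nat), k + l * m ≤ cs.length → m ≤ fuel →
      (((m : Int) ≤ pvA_while cs (l : Int) motif fuel 0 (k : Int)) ↔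
        (cs.drop k).take (l * m) = (List.replicate m motif).flatten) := by
  intro m
  induction m with
  | zero =>
      intro k fuel _ _
      simp [pvA_while_nonneg]
  | succ m ih =>
      intro k fuel hk hfuel
      obtain ⟨f, rfl⟩ : ∃ f, fuel = f + 1 := ⟨fuel - 1, by omega⟩
      have hke : l * (m + 1) = l + l * m := by ring
      rw [hke] at hk
      have hkl : k + l ≤ cs.length := by omega
      have hcond1 : (k : Int) ≤ (cs.length : Int) - (l : Int) := by omega
      have hslice : PySem.List.slice cs (some (k : Int)) (some ((k : Int) + (l : Int))) =
          (cs.drop k).take l := PySem.List.slice_natCast_add cs k l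
      simp only [pvA_while, hslice]
      by_cases hm : (cs.drop k).take l = motif
      · have hstep : ((k : Int) + (l : Int)) = ((k + l : Nat) : Int) := by push_cast; ring
        rw [if_pos ⟨hcond1, hm⟩, pvA_while_acc, hstep]
        have ihkl := ih (k + l) f (by omega) (by omega)
        have hsplit : (cs.drop k).take (l * (m + 1)) =
            (cs.drop k).take l ++ (cs.drop (k + l)).take (l * m) := by
          have : l * (m + 1) = l + l * m := by ring
          rw [this, List.take_add, List.drop_drop]
        constructor
        · intro h
          have : (m : Int) ≤ pvA_while cs (l : Int) motif f 0 ((k + l : Nat) : Int) := by push_cast at h ⊢; omega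
          rw [hsplit, hm, List.replicate_succ, List.flatten_cons, ihkl.mp this]
        · intro h
          rw [hsplit, hm, List.replicate_succ, List.flatten_cons] at h
          have h2 := ihkl.mpr (List.append_cancel_left h)
          push_cast at h2 ⊢; omega
      · rw [if_neg (by intro h; exact hm h.2)]
        constructor
        · intro h; exfalso; push_cast at h; omega
        · intro h
          exfalso
          apply hm
          have h1 : ((cs.drop k).take (l * (m + 1))).take l = (cs.drop k).take l := by
            rw [List.take_take]
            congr 1
            omega
          have h2 : ((List.replicate (m + 1) motif).flatten).take l = motif := by
            rw [List.replicate_succ, List.flatten_cons, ← hlen, List.take_left]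
          rw [← h1, h, h2]

-- min_count < 0 → len // min_count ≤ 0 (so a nonempty L-range forces min_count ≥ 1)
theorem pv_floordiv_nonpos (a b : Int) (ha : 0 ≤ a) (hb : b < 0) : PySem.Int.floordiv a b ≤ 0 := by
  simp only [PySem.Int.floordiv]
  exact Int.fdiv_nonpos_of_nonneg_of_nonpos ha (by omega)

theorem extract_crispr_repeat_sequences_py_spec : Claim_equal_extract_crispr_repeat_sequences_py := by
  intro nucleotide min_len min_count _hDom hPre
  obtain ⟨hmc0, hPre2⟩ := hPre
  unfold Spec_extract_crispr_repeat_sequences_py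
  simp only [extract_crispr_repeat_sequences_py, extract_crispr_repeat_sequences_py_alt]
  refine congrArg Prod.fst (pv_foldl_congr _ ?_)
  intro st L hL
  rw [PySem.List.mem_pyRange_one] at hL
  set cs := pvClean nucleotide with hcs
  set len : Int := (cs.length : Int) with hlen
  -- dispose of the cases where the executed L cannot satisfy 1 ≤ L ∧ 1 ≤ min_count
  by_cases hmcpos : 0 < min_count
  case neg =>
    -- min_count < 0: the inner range is empty (Pre_'s third disjunct), or L cannot exist
    have hmcneg : min_count < 0 := by omega
    have hfd : PySem.Int.floordiv len min_count ≤ 0 :=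
      pv_floordiv_nonpos _ _ (by positivity) hmcneg
    rcases hPre2 with h1 | h2 | h3
    · -- 1 ≤ min_len but L < stop ≤ 1: impossible
      omega
    · omega
    · -- all inner i-ranges are empty: both bodies leave st unchanged
      have hLe : L ≤ min 55 (PySem.Int.floordiv len min_count + 1) - 1 := by omega
      have hmul : (min 55 (PySem.Int.floordiv len min_count + 1) - 1) * min_count ≤ L * min_count :=
        mul_le_mul_of_nonpos_right hLe (by omega)
      have hempty : len - L * min_count + 1 ≤ 0 := by omega
      rw [PySem.List.pyRange_one_eq_nil (show len - L * min_count + 1 ≤ (0:Int) by omega)]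
      rfl
  case pos =>
  -- here 1 ≤ min_count and 1 ≤ L
  have hL1 : 1 ≤ L := by
    rcases hPre2 with h1 | h2 | h3
    · omega
    · omega
    · omega
  refine pv_foldl_congr _ ?_
  intro st' i hi
  rw [PySem.List.mem_pyRange_one] at hi
  have hbound : i + L * min_count ≤ len := by omega
  -- move to natural numbers
  lift min_count to ℕ using (by omega : (0:Int) ≤ min_count) with m hm
  lift L to ℕ using (by omega : (0:Int) ≤ L) with l hl
  lift i to ℕ using hi.1 with k hk
  have hm1 : 1 ≤ m := by exact_mod_cast hmcpos
  have hl1 : 1 ≤ l := by exact_mod_cast hL1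
  have hkb : k + l * m ≤ cs.length := by
    have : ((k : Int)) + (l : Int) * (m : Int) ≤ (cs.length : Int) := hbound
    push_cast at this
    exact_mod_cast this
  have hkl : k + l ≤ cs.length := by
    have : l * 1 ≤ l * m := Nat.mul_le_mul_left l hm1
    omega
  -- identify the motif
  have hmot : PySem.List.slice cs (some (k : Int)) (some ((k : Int) + (l : Int))) =
      (cs.drop k).take l := PySem.List.slice_natCast_add cs k l
  have hblock : PySem.List.slice cs (some (k : Int)) (some ((k : Int) + (l : Int) * (m : Int))) =
      (cs.drop k).take (l * m) := by
    have : ((k : Int) + (l : Int) * (m : Int)) = ((k : Int) + ((l * m : Nat) : Int)) := by push_cast; ring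
    rw [this]
    exact PySem.List.slice_natCast_add cs k (l * m)
  set motif := (cs.drop k).take l with hmotif
  have hlenmot : motif.length = l := by
    simp [hmotif]
    omega
  have hrep : PySem.List.pyRepeat motif ((m : Nat) : Int) = (List.replicate m motif).flatten := by
    simp [PySem.List.pyRepeat]
  -- the guard equivalence
  have hguard := pv_count_iff cs l motif hlenmot m k (cs.length + 1) hkb
    (by have : 1 * m ≤ l * m := Nat.mul_le_mul_right m hl1; omega)
  simp only [hmot, hblock, hrep]
  by_cases hc : PySem.Set.contains st'.2 motif
  · rw [if_pos hc, if_neg (by rintro ⟨h1, -⟩; rw [hc] at h1; simp at h1)]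
  · rw [if_neg hc]
    by_cases hP : (cs.drop k).take (l * m) = (List.replicate m motif).flatten
    · rw [if_pos (hguard.mpr hP), if_pos ⟨by simpa using hc, hP⟩]
    · rw [if_neg (fun h => hP (hguard.mp h)), if_neg (by rintro ⟨-, h2⟩; exact hP h2)]
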